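-- pv_equiv track=rewrite | github.com/LukaszBialik/Bioinformatyka | src/Main.py | build_combined_spectrum
-- ===== SOURCE A (Python) =====
-- def build_combined_spectrum(S1, S2):
--     combined_spectrum = []
--     for c1 in S1:
--         prefix1 = c1[:-2]
--         for c2 in S2:
--             prefix2 = c2[:-1]
--             if prefix1 == prefix2:
--                 new_oligo = prefix1 + c2[-1] + c1[-1]
--                 combined_spectrum.append(new_oligo)
--     sqpe = len(S1) + len(S2) - 2*len(combined_spectrum)
--     return combined_spectrum, sqpe
-- ===== SOURCE B (Python) =====
-- def build_combined_spectrum(S1, S2):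
--     index = {}
--     for k, c2 in ((c2[:-1], c2) for c2 in S2):
--         index[k] = index.get(k, []) + [c2]
--     combined = [c2 + c1[-1] for c1 in S1 for c2 in index.get(c1[:-2], [])]
--     return combined, len(S1) + len(S2) - 2 * len(combined)
-- ===== Notes on version B (the rewrite author's own statement) =====
-- stated objective: faster
-- what changed: Replaces the nested scan of S2 for every element of S1 by a dict grouping S2 once by its [:-1] prefix and a single lookup per element of S1 (also using that a matching oligo is just c2 + c1[-1]).
import Mathlib
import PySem

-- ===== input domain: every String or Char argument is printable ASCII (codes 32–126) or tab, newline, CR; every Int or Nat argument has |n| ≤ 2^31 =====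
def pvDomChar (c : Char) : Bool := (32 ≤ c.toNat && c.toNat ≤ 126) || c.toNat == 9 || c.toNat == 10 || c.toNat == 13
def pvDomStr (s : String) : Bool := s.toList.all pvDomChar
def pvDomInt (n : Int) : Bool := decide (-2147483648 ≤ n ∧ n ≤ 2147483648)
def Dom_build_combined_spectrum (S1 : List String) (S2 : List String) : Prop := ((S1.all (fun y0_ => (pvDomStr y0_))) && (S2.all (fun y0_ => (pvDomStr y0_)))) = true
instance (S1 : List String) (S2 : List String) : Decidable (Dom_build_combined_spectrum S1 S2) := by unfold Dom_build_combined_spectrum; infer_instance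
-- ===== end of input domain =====

-- B groups S2 once in a dict keyed by the [:-1] prefix and does one lookup per element of S1
-- instead of rescanning S2 for every element of S1 (and a matching oligo is just c2 + c1[-1]).

-- ===== PORT A =====
def build_combined_spectrum (S1 : List String) (S2 : List String) : List String × Int :=
  let combined := S1.foldl (fun acc c1 =>
    let prefix1 := PySem.List.slice c1.toList none (some (-2))
    S2.foldl (fun acc2 c2 =>
      let prefix2 := PySem.List.slice c2.toList none (some (-1))
      if prefix1 == prefix2 then
        acc2 ++ [String.ofList (prefix1 ++
          [(PySem.List.pyGet? c2.toList (-1)).getD ' ',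
           (PySem.List.pyGet? c1.toList (-1)).getD ' '])]
      else acc2) acc) []
  (combined, (S1.length : Int) + (S2.length : Int) - 2 * (combined.length : Int))

-- ===== PORT B =====
def build_combined_spectrum_alt (S1 : List String) (S2 : List String) : List String × Int :=
  let index : PySem.Dict (List Char) (List String) :=
    (S2.map (fun c2 => (PySem.List.slice c2.toList none (some (-1)), c2))).foldl
      (fun d p => d.modify p.1 [] (· ++ [p.2])) PySem.Dict.empty
  let combined := S1.flatMap (fun c1 =>
    (index.getD (PySem.List.slice c1.toList none (some (-2))) []).map
      (fun c2 => String.ofList (c2.toList ++ [(PySem.List.pyGet? c1.toList (-1)).getD ' '])))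
  (combined, (S1.length : Int) + (S2.length : Int) - 2 * (combined.length : Int))

-- ===== PRECONDITION & SPEC =====
-- Pre_ excludes exactly the inputs on which the Python A raises IndexError: a matching pair
-- (c1[:-2] == c2[:-1]) in which c1 or c2 is the empty string, so that c1[-1] / c2[-1] raises.
def Pre_build_combined_spectrum (S1 : List String) (S2 : List String) : Prop :=
  ∀ c1 ∈ S1, ∀ c2 ∈ S2,
    PySem.List.slice c1.toList none (some (-2)) = PySem.List.slice c2.toList none (some (-1)) →
    c1.toList ≠ [] ∧ c2.toList ≠ []
instance (S1 : List String) (S2 : List String) : Decidable (Pre_build_combined_spectrum S1 S2) := by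
  unfold Pre_build_combined_spectrum; infer_instance

def pvWitness_build_combined_spectrum : List String × List String := (["abc", "abb"], ["ab", "bb"])

def Spec_build_combined_spectrum (S1 : List String) (S2 : List String) (out : List String × Int) : Prop := out = build_combined_spectrum_alt S1 S2
instance (S1 : List String) (S2 : List String) (out : List String × Int) : Decidable (Spec_build_combined_spectrum S1 S2 out) := by unfold Spec_build_combined_spectrum; infer_instance

-- ===== CLAIM (what is proved, stated in full; the proofs are below) =====
def Claim_equal_build_combined_spectrum : Prop := ∀ (S1 : List String) (S2 : List String), Dom_build_combined_spectrum S1 S2 → Pre_build_combined_spectrum S1 S2 → Spec_build_combined_spectrum S1 S2 (build_combined_spectrum S1 S2)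

-- ===== LEMMAS AND PROOFS =====

-- B's dict lookup is exactly the in-order group of S2 with the given [:-1] prefix.
theorem group_lemma (S2 : List String) (k : List Char) :
    ((S2.map (fun c2 => (PySem.List.slice c2.toList none (some (-1)), c2))).foldl
      (fun d p => d.modify p.1 [] (· ++ [p.2])) PySem.Dict.empty).getD k []
    = S2.filter (fun c2 => PySem.List.slice c2.toList none (some (-1)) == k) := by
  rw [PySem.Dict.getD_foldl_modify_append]
  simp [List.filter_map, Function.comp_def]

-- A's inner loop over S2, for one fixed c1, produces the mapped group.
theorem innerA_eq (S2 : List String) (c1 : String)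
    (h2 : ∀ c2 ∈ S2, PySem.List.slice c1.toList none (some (-2)) = PySem.List.slice c2.toList none (some (-1)) → c2.toList ≠ [])
    (acc : List String) :
    S2.foldl (fun acc2 c2 =>
      if PySem.List.slice c1.toList none (some (-2)) == PySem.List.slice c2.toList none (some (-1)) then
        acc2 ++ [String.ofList (PySem.List.slice c1.toList none (some (-2)) ++
          [(PySem.List.pyGet? c2.toList (-1)).getD ' ',
           (PySem.List.pyGet? c1.toList (-1)).getD ' '])]
      else acc2) acc
    = acc ++ (S2.filter (fun c2 => PySem.List.slice c2.toList none (some (-1)) == PySem.List.slice c1.toList none (some (-2)))).map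
        (fun c2 => String.ofList (c2.toList ++ [(PySem.List.pyGet? c1.toList (-1)).getD ' '])) := by
  rw [PySem.List.foldl_append_if]
  congr 1
  rw [List.filter_congr (fun c2 _ => Bool.beq_comm)]
  apply List.map_congr_left
  intro c2 hc2
  obtain ⟨hmem, hkey⟩ := List.mem_filter.mp hc2
  have hkeq : PySem.List.slice c1.toList none (some (-2)) = PySem.List.slice c2.toList none (some (-1)) :=
    (beq_iff_eq.mp hkey).symm
  have hne : c2.toList ≠ [] := h2 c2 hmem hkeq
  have h1 : PySem.List.slice c1.toList none (some (-2)) = c2.toList.dropLast := by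
    rw [hkeq, PySem.List.slice_to_neg_one]
  have hl : (PySem.List.pyGet? c2.toList (-1)).getD ' ' = c2.toList.getLast hne := by
    rw [PySem.List.pyGet?_neg_one, List.getLast?_eq_some_getLast hne]; rfl
  rw [h1, hl,
    show [c2.toList.getLast hne, (PySem.List.pyGet? c1.toList (-1)).getD ' ']
       = [c2.toList.getLast hne] ++ [(PySem.List.pyGet? c1.toList (-1)).getD ' '] from rfl,
    ← List.append_assoc, List.dropLast_append_getLast hne]

-- ===== VERDICT (by name: the statement is the Claim_ definition above) =====
theorem build_combined_spectrum_spec : Claim_equal_build_combined_spectrum := by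
  intro S1 S2 _ hpre
  unfold Spec_build_combined_spectrum build_combined_spectrum build_combined_spectrum_alt
  dsimp only
  have hstep := PySem.List.foldl_congr_mem' S1
    (fun (acc : List String) (c1 : String) =>
      S2.foldl (fun acc2 c2 =>
        if PySem.List.slice c1.toList none (some (-2)) == PySem.List.slice c2.toList none (some (-1)) then
          acc2 ++ [String.ofList (PySem.List.slice c1.toList none (some (-2)) ++
            [(PySem.List.pyGet? c2.toList (-1)).getD ' ',
             (PySem.List.pyGet? c1.toList (-1)).getD ' '])]
        else acc2) acc)
    (fun (acc : List String) (c1 : String) =>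
      acc ++ (((S2.map (fun c2 => (PySem.List.slice c2.toList none (some (-1)), c2))).foldl
          (fun d p => d.modify p.1 [] (· ++ [p.2])) PySem.Dict.empty).getD
            (PySem.List.slice c1.toList none (some (-2))) []).map
          (fun c2 => String.ofList (c2.toList ++ [(PySem.List.pyGet? c1.toList (-1)).getD ' '])))
    []
    (fun c1 hc1 acc => by
      dsimp only
      rw [innerA_eq S2 c1 (fun c2 hc2 hk => (hpre c1 hc1 c2 hc2 hk).2) acc, group_lemma])
  rw [hstep, PySem.List.foldl_append_eq_flatMap, List.nil_append]
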